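-- pv_equiv track=rewrite | github.com/Prasadbade/Python-programming | ass19_4.py | Chk3digit
-- ===== SOURCE A (Python) =====
-- def Chk3digit(no):
--     cnt = 0
--     while(no!=0):
--         digit = int(no%10)
--         cnt +=1
--         no = int(no/10)
--
--     if(cnt == 3 ):
--         return True
--     else:
--         return False
-- ===== SOURCE B (Python) =====
-- def Chk3digit(no):
--     m = abs(int(no))
--     return 100 <= m <= 999
-- ===== Notes on version B (the rewrite author's own statement) =====
-- stated objective: simpler
-- what changed: Replaced the digit-counting while-loop with a single closed-form range comparison on the truncated magnitude.
import Mathlib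
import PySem

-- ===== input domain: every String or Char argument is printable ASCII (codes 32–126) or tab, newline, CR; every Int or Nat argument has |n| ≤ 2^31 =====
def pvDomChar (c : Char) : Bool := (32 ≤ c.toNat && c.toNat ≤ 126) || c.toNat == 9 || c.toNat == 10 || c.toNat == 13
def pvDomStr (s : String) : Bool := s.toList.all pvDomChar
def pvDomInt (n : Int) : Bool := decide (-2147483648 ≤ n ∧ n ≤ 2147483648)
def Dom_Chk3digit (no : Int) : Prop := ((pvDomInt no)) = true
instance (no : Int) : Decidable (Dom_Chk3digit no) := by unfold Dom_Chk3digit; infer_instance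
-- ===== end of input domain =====

-- B replaces A's digit-counting loop with one closed-form magnitude comparison (simpler).

-- ===== PORT A =====
-- the while loop of A; `int(no/10)` truncates toward zero, which on |no| ≤ 2^31
-- (float division is exact enough there) equals Int.tdiv no 10
def chkLoop (no : Int) (cnt : Int) : Int :=
  if h : no = 0 then cnt
  else
    let _digit : Int := PySem.Int.mod no 10
    chkLoop (no.tdiv 10) (cnt + 1)
termination_by no.natAbs
decreasing_by
  have : (no.tdiv 10).natAbs = no.natAbs / 10 := Int.natAbs_tdiv no 10
  rw [this]
  exact Nat.div_lt_self (by omega) (by norm_num)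

def Chk3digit (no : Int) : Bool :=
  if chkLoop no 0 = 3 then true else false

-- ===== PORT B =====
def Chk3digit_alt (no : Int) : Bool :=
  let m : Int := |no|
  100 ≤ m && m ≤ 999

-- ===== PRECONDITION & SPEC =====
def Spec_Chk3digit (no : Int) (out : Bool) : Prop := out = Chk3digit_alt no
instance (no : Int) (out : Bool) : Decidable (Spec_Chk3digit no out) := by unfold Spec_Chk3digit; infer_instance

-- ===== CLAIM (what is proved, stated in full; the proofs are below) =====
def Claim_equal_Chk3digit : Prop := ∀ (no : Int), Dom_Chk3digit no → Spec_Chk3digit no (Chk3digit no)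

-- ===== LEMMAS AND PROOFS =====

theorem chkLoop_zero (c : Int) : chkLoop 0 c = c := by rw [chkLoop]; rfl

theorem chkLoop_ne (n c : Int) (h : n ≠ 0) : chkLoop n c = chkLoop (n.tdiv 10) (c + 1) := by
  rw [chkLoop, dif_neg h]

theorem chkLoop_ge (no cnt : Int) : cnt ≤ chkLoop no cnt := by
  induction no, cnt using chkLoop.induct with
  | case1 c => rw [chkLoop_zero]
  | case2 n c h ih =>
      rw [chkLoop_ne n c h]
      exact le_trans (by omega) ih

theorem chk_tail_arith (n1 n2 n3 no x : Int)
    (e1 : n1.natAbs = no.natAbs / 10)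
    (e2 : n2.natAbs = n1.natAbs / 10)
    (e3 : n3.natAbs = n2.natAbs / 10)
    (hge : (4:Int) ≤ x)
    (h3' : n3.natAbs ≠ 0) :
    (x = 3) ↔ (100 ≤ no.natAbs ∧ no.natAbs ≤ 999) := by omega

theorem chkLoop_eq_three (no : Int) :
    (chkLoop no 0 = 3) ↔ (100 ≤ no.natAbs ∧ no.natAbs ≤ 999) := by
  by_cases h0 : no = 0
  · subst h0; rw [chkLoop_zero]; norm_num
  · rw [chkLoop_ne no 0 h0]
    have e1 : (no.tdiv 10).natAbs = no.natAbs / 10 := Int.natAbs_tdiv no 10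
    by_cases h1 : no.tdiv 10 = 0
    · rw [h1, chkLoop_zero]
      rw [h1, Int.natAbs_zero] at e1
      have h0' : no.natAbs ≠ 0 := fun h => h0 (Int.natAbs_eq_zero.mp h)
      omega
    · rw [chkLoop_ne _ _ h1]
      have e2 : ((no.tdiv 10).tdiv 10).natAbs = (no.tdiv 10).natAbs / 10 :=
        Int.natAbs_tdiv _ 10
      by_cases h2 : (no.tdiv 10).tdiv 10 = 0
      · rw [h2, chkLoop_zero]
        rw [h2, Int.natAbs_zero] at e2
        have h1' : (no.tdiv 10).natAbs ≠ 0 := fun h => h1 (Int.natAbs_eq_zero.mp h)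
        omega
      · rw [chkLoop_ne _ _ h2]
        have e3 : (((no.tdiv 10).tdiv 10).tdiv 10).natAbs = ((no.tdiv 10).tdiv 10).natAbs / 10 :=
          Int.natAbs_tdiv _ 10
        by_cases h3 : ((no.tdiv 10).tdiv 10).tdiv 10 = 0
        · rw [h3, chkLoop_zero]
          rw [h3, Int.natAbs_zero] at e3
          have h2' : ((no.tdiv 10).tdiv 10).natAbs ≠ 0 := fun h => h2 (Int.natAbs_eq_zero.mp h)
          omega
        · rw [chkLoop_ne _ _ h3]
          have hge := chkLoop_ge ((((no.tdiv 10).tdiv 10).tdiv 10).tdiv 10) 4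
          have h3' : (((no.tdiv 10).tdiv 10).tdiv 10).natAbs ≠ 0 :=
            fun h => h3 (Int.natAbs_eq_zero.mp h)
          exact chk_tail_arith _ _ _ _ _ e1 e2 e3 hge h3'

theorem alt_iff (no : Int) :
    (Chk3digit_alt no = true) ↔ (100 ≤ no.natAbs ∧ no.natAbs ≤ 999) := by
  simp only [Chk3digit_alt, Bool.and_eq_true, decide_eq_true_eq]
  rw [Int.abs_eq_natAbs]
  omega

-- ===== VERDICT (by name: the statement is the Claim_ definition above) =====
theorem Chk3digit_spec : Claim_equal_Chk3digit := by
  intro no _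
  unfold Spec_Chk3digit Chk3digit
  by_cases hc : chkLoop no 0 = 3
  · rw [if_pos hc]
    exact ((alt_iff no).mpr ((chkLoop_eq_three no).mp hc)).symm
  · rw [if_neg hc]
    have : Chk3digit_alt no ≠ true :=
      fun hh => hc ((chkLoop_eq_three no).mpr ((alt_iff no).mp hh))
    exact (Bool.not_eq_true _ |>.mp this).symm
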